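-- pv_equiv track=rewrite | github.com/Airyshtoteles/learnLeetCode | Day43/Part1/dungeon_echo.py | count_heard_cells
-- ===== SOURCE A (Python) =====
-- from collections import deque
-- from typing import List
--
-- def count_heard_cells(grid: List[List[int]]) -> int:
--     if not grid:
--         return 0
--     m, n = len(grid), len(grid[0])
--
--     # Queue: (r, c, bounced_flag)
--     q = deque()
--     visited = set()
--     heard = set()
--
--     # Initialize sources
--     for r in range(m):
--         for c in range(n):
--             if grid[r][c] == 2:
--                 q.append((r, c, 0))
--                 visited.add((r, c, 0))
--                 heard.add((r, c))
--
--     dirs = [(0,1), (0,-1), (1,0), (-1,0)] # R, L, D, U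
--
--     while q:
--         r, c, bounced = q.popleft()
--
--         for dr, dc in dirs:
--             nr, nc = r + dr, c + dc
--
--             if 0 <= nr < m and 0 <= nc < n:
--                 if grid[nr][nc] == 1:
--                     # Hit wall
--                     if not bounced:
--                         # Bounce back: from wall (nr,nc) back to (r,c) is effectively
--                         # starting a new wave from (r,c) in direction (-dr, -dc)?
--                         # Or simply the wave is now at (r,c) ready to move opposite?
--                         # Problem: "bounced back in opposite direction in next second".
--                         # So at t+1, it is at (r + (-dr), c + (-dc))?
--                         # Let's assume it reflects: effectively moving from (r,c) to (r-dr, c-dc) is the bounce step.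
--
--                         # Actually, simpler: The wave at (r,c) tried to go to (nr,nc).
--                         # It hit wall. Next step, it travels from (r,c) to (r-dr, c-dc).
--                         br, bc = r - dr, c - dc
--                         if 0 <= br < m and 0 <= bc < n and grid[br][bc] != 1:
--                             if (br, bc, 1) not in visited:
--                                 visited.add((br, bc, 1))
--                                 heard.add((br, bc))
--                                 q.append((br, bc, 1))
--                 else:
--                     # Normal spread
--                     if (nr, nc, bounced) not in visited:
--                         visited.add((nr, nc, bounced))
--                         heard.add((nr, nc))
--                         q.append((nr, nc, bounced))
--
--     return len(heard)
-- ===== SOURCE B (Python) =====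
-- def count_heard_cells(grid):
--     if not grid:
--         return 0
--     m, n = len(grid), len(grid[0])
--     dirs = [(0, 1), (0, -1), (1, 0), (-1, 0)]
--
--     def is_open(r, c):
--         return 0 <= r < m and 0 <= c < n and grid[r][c] != 1
--
--     def flood(starts):
--         seen = set(starts)
--         frontier = list(seen)
--         while frontier:
--             nxt = []
--             for r, c in frontier:
--                 for dr, dc in dirs:
--                     nb = (r + dr, c + dc)
--                     if is_open(*nb) and nb not in seen:
--                         seen.add(nb)
--                         nxt.append(nb)
--             frontier = nxt
--         return seen
--
--     sources = [(r, c) for r in range(m) for c in range(n) if grid[r][c] == 2]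
--     s0 = flood(sources)
--
--     seeds = set()
--     for r, c in s0:
--         for dr, dc in dirs:
--             if 0 <= r + dr < m and 0 <= c + dc < n and grid[r + dr][c + dc] == 1 and is_open(r - dr, c - dc):
--                 seeds.add((r - dr, c - dc))
--     s1 = flood(seeds)
--     return len(s0 | s1)
-- ===== Notes on version B (the rewrite author's own statement) =====
-- stated objective: alternative
-- what changed: Replaces A's single interleaved BFS over (row,col,bounced) states with three sequential passes: a plain frontier-by-frontier flood fill from the sources, a scan of that reachable set generating reflection seeds at every wall contact, and a second plain flood fill from those seeds, returning the size of the union.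
import Mathlib
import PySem

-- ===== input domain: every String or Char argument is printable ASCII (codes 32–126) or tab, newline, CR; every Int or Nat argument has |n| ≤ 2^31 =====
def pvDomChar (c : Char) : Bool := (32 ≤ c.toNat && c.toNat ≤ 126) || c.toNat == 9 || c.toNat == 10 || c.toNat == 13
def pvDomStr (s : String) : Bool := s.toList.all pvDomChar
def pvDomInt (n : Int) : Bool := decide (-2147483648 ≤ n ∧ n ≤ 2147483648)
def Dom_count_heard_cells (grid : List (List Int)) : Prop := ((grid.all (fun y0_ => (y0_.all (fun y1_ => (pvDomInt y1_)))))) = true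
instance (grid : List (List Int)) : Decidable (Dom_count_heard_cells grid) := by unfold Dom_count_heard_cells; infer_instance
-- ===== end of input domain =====

-- B replaces A's single interleaved BFS over (row, col, bounced) states by three sequential
-- passes (flood fill from the sources, a seed-generating scan over that set, flood fill from
-- the seeds) — an alternative decomposition of the same work, returning the same count.

-- grid[r][c], total form (Pre_ guarantees every access the Python makes is in range)
def pvCell (grid : List (List Int)) (r c : Int) : Int :=
  PySem.List.pyGetD (PySem.List.pyGetD grid r []) c 0

def pvDirs : List (Int × Int) := [(0,1), (0,-1), (1,0), (-1,0)]

-- ===== PORT A =====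
def pvStepA (grid : List (List Int)) (m n r c b : Int)
    (acc : PySem.Set (Int × Int × Int) × PySem.Set (Int × Int) × List (Int × Int × Int))
    (d : Int × Int) :
    PySem.Set (Int × Int × Int) × PySem.Set (Int × Int) × List (Int × Int × Int) :=
  let nr := r + d.1
  let nc := c + d.2
  if 0 ≤ nr ∧ nr < m ∧ 0 ≤ nc ∧ nc < n then
    if pvCell grid nr nc = 1 then
      if b = 0 then
        let br := r - d.1
        let bc := c - d.2
        if (0 ≤ br ∧ br < m ∧ 0 ≤ bc ∧ bc < n) ∧ pvCell grid br bc ≠ 1 then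
          if (br, bc, (1:Int)) ∈ acc.1 then acc
          else (PySem.Set.add acc.1 (br, bc, 1), PySem.Set.add acc.2.1 (br, bc), acc.2.2 ++ [(br, bc, 1)])
        else acc
      else acc
    else
      if (nr, nc, b) ∈ acc.1 then acc
      else (PySem.Set.add acc.1 (nr, nc, b), PySem.Set.add acc.2.1 (nr, nc), acc.2.2 ++ [(nr, nc, b)])
  else acc

-- the while-loop; fuel only makes the recursion structural (proved sufficient below)
def pvLoopA (grid : List (List Int)) (m n : Int) :
    Nat → List (Int × Int × Int) → PySem.Set (Int × Int × Int) → PySem.Set (Int × Int) →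
    PySem.Set (Int × Int × Int) × PySem.Set (Int × Int)
  | 0, _, vis, heard => (vis, heard)
  | _ + 1, [], vis, heard => (vis, heard)
  | fuel + 1, s :: q, vis, heard =>
      let res := pvDirs.foldl (pvStepA grid m n s.1 s.2.1 s.2.2) (vis, heard, q)
      pvLoopA grid m n fuel res.2.2 res.1 res.2.1

def count_heard_cells (grid : List (List Int)) : Int :=
  if grid = [] then 0
  else
    let m : Int := (grid.length : Int)
    let n : Int := ((grid.headD []).length : Int)
    let init := (PySem.List.pyRange 0 m 1).foldl (fun acc r =>
        (PySem.List.pyRange 0 n 1).foldl (fun acc c =>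
          if pvCell grid r c = 2 then
            (acc.1 ++ [(r, c, (0:Int))], PySem.Set.add acc.2.1 (r, c, (0:Int)),
             PySem.Set.add acc.2.2 (r, c))
          else acc) acc)
      (([] : List (Int × Int × Int)), (PySem.Set.empty : PySem.Set (Int × Int × Int)),
       (PySem.Set.empty : PySem.Set (Int × Int)))
    let fin := pvLoopA grid m n (3 * (grid.length * (grid.headD []).length) + 1) init.1 init.2.1 init.2.2
    (PySem.Set.len fin.2 : Int)

-- ===== PORT B =====
def pvOpen (grid : List (List Int)) (m n r c : Int) : Bool :=
  decide (0 ≤ r ∧ r < m ∧ 0 ≤ c ∧ c < n) && decide (pvCell grid r c ≠ 1)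

-- one whole-frontier round per recursive call; fuel only makes it structural
def pvFlood (grid : List (List Int)) (m n : Int) :
    Nat → List (Int × Int) → PySem.Set (Int × Int) → PySem.Set (Int × Int)
  | 0, _, seen => seen
  | _ + 1, [], seen => seen
  | fuel + 1, p :: fr, seen =>
      let res := (p :: fr).foldl (fun acc q =>
          pvDirs.foldl (fun acc d =>
            let nb := (q.1 + d.1, q.2 + d.2)
            if pvOpen grid m n nb.1 nb.2 && !(PySem.Set.contains acc.1 nb) then
              (PySem.Set.add acc.1 nb, acc.2 ++ [nb])
            else acc) acc)
        (seen, ([] : List (Int × Int)))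
      pvFlood grid m n fuel res.2 res.1

def count_heard_cells_alt (grid : List (List Int)) : Int :=
  if grid = [] then 0
  else
    let m : Int := (grid.length : Int)
    let n : Int := ((grid.headD []).length : Int)
    let sources : List (Int × Int) :=
      (PySem.List.pyRange 0 m 1).flatMap (fun r =>
        ((PySem.List.pyRange 0 n 1).filter (fun c => pvCell grid r c == 2)).map (fun c => (r, c)))
    let fuel := grid.length * (grid.headD []).length + 2
    let s0 := pvFlood grid m n fuel (PySem.Set.ofList sources) (PySem.Set.ofList sources)
    let seeds := s0.foldl (fun sd p =>
        pvDirs.foldl (fun sd d =>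
          if decide (0 ≤ p.1 + d.1 ∧ p.1 + d.1 < m ∧ 0 ≤ p.2 + d.2 ∧ p.2 + d.2 < n) &&
              (pvCell grid (p.1 + d.1) (p.2 + d.2) == 1) &&
              pvOpen grid m n (p.1 - d.1) (p.2 - d.2) then
            PySem.Set.add sd (p.1 - d.1, p.2 - d.2)
          else sd) sd)
      (PySem.Set.empty : PySem.Set (Int × Int))
    let s1 := pvFlood grid m n fuel seeds seeds
    (PySem.Set.len (PySem.Set.union s0 s1) : Int)

-- ===== PRECONDITION & SPEC =====
-- Pre_ excludes ragged grids in which some row is shorter than the first row: there the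
-- Python A raises IndexError while scanning for sources.
def Pre_count_heard_cells (grid : List (List Int)) : Prop :=
  ∀ row ∈ grid, (grid.headD []).length ≤ row.length
instance (grid : List (List Int)) : Decidable (Pre_count_heard_cells grid) := by
  unfold Pre_count_heard_cells; infer_instance

def pvWitness_count_heard_cells : List (List Int) := [[2, 0], [1, 0]]

def Spec_count_heard_cells (grid : List (List Int)) (out : Int) : Prop := out = count_heard_cells_alt grid
instance (grid : List (List Int)) (out : Int) : Decidable (Spec_count_heard_cells grid out) := by
  unfold Spec_count_heard_cells; infer_instance

-- ===== CLAIM (what is proved, stated in full; the proofs are below) =====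
def Claim_equal_count_heard_cells : Prop := ∀ (grid : List (List Int)), Dom_count_heard_cells grid → Pre_count_heard_cells grid → Spec_count_heard_cells grid (count_heard_cells grid)

-- ===== LEMMAS AND PROOFS =====

-- ---- reachability vocabulary (proof-only) ----
def pvInb (m n : Int) (p : Int × Int) : Prop := 0 ≤ p.1 ∧ p.1 < m ∧ 0 ≤ p.2 ∧ p.2 < n

def pvOpenP (grid : List (List Int)) (m n : Int) (p : Int × Int) : Prop :=
  pvInb m n p ∧ pvCell grid p.1 p.2 ≠ 1

def pvSrcP (grid : List (List Int)) (m n : Int) (p : Int × Int) : Prop :=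
  pvInb m n p ∧ pvCell grid p.1 p.2 = 2

inductive pvRF (grid : List (List Int)) (m n : Int) (P : Int × Int → Prop) : Int × Int → Prop
  | base (p : Int × Int) : P p → pvRF grid m n P p
  | step (p d : Int × Int) : pvRF grid m n P p → d ∈ pvDirs →
      pvOpenP grid m n (p.1 + d.1, p.2 + d.2) → pvRF grid m n P (p.1 + d.1, p.2 + d.2)

def pvBounce (grid : List (List Int)) (m n : Int) (p t : Int × Int) : Prop :=
  ∃ d ∈ pvDirs, pvInb m n (p.1 + d.1, p.2 + d.2) ∧ pvCell grid (p.1 + d.1) (p.2 + d.2) = 1 ∧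
    pvOpenP grid m n (p.1 - d.1, p.2 - d.2) ∧ t = (p.1 - d.1, p.2 - d.2)

def pvSeedP (grid : List (List Int)) (m n : Int) (t : Int × Int) : Prop :=
  ∃ p, pvRF grid m n (pvSrcP grid m n) p ∧ pvBounce grid m n p t

def pvEdgeAd (grid : List (List Int)) (m n : Int) (d : Int × Int) (s t : Int × Int × Int) : Prop :=
  (pvOpenP grid m n (s.1 + d.1, s.2.1 + d.2) ∧ t = (s.1 + d.1, s.2.1 + d.2, s.2.2)) ∨
  (s.2.2 = 0 ∧ pvInb m n (s.1 + d.1, s.2.1 + d.2) ∧ pvCell grid (s.1 + d.1) (s.2.1 + d.2) = 1 ∧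
    pvOpenP grid m n (s.1 - d.1, s.2.1 - d.2) ∧ t = (s.1 - d.1, s.2.1 - d.2, 1))

def pvEdgeA (grid : List (List Int)) (m n : Int) (s t : Int × Int × Int) : Prop :=
  ∃ d ∈ pvDirs, pvEdgeAd grid m n d s t

inductive pvRA (grid : List (List Int)) (m n : Int) : Int × Int × Int → Prop
  | src (p : Int × Int) : pvSrcP grid m n p → pvRA grid m n (p.1, p.2, 0)
  | step (s t : Int × Int × Int) : pvRA grid m n s → pvEdgeA grid m n s t → pvRA grid m n t

def pvValid (m n : Int) (s : Int × Int × Int) : Prop :=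
  pvInb m n (s.1, s.2.1) ∧ (s.2.2 = 0 ∨ s.2.2 = 1)

-- ---- generic small lemmas ----
theorem pvLen_eq {α : Type} (a b : List α) (ha : a.Nodup) (hb : b.Nodup)
    (h : ∀ x, x ∈ a ↔ x ∈ b) : a.length = b.length :=
  ((List.perm_ext_iff_of_nodup ha hb).2 h).length_eq

theorem pvNodup_concat {α : Type} (l : List α) (a : α) (h1 : l.Nodup) (h2 : a ∉ l) :
    (l ++ [a]).Nodup :=
  List.Nodup.append h1 (List.nodup_singleton a)
    (fun _ hx hx2 => h2 ((List.eq_of_mem_singleton hx2) ▸ hx))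

theorem pvOpen_iff (grid : List (List Int)) (m n r c : Int) :
    pvOpen grid m n r c = true ↔ pvOpenP grid m n (r, c) := by
  simp [pvOpen, pvOpenP, pvInb, and_assoc]

theorem pvFlatMap_len {α β γ : Type} (l1 : List α) (l2 : List β) (f : α → β → γ) :
    (l1.flatMap (fun r => l2.map (f r))).length = l1.length * l2.length := by
  induction l1 with
  | nil => simp
  | cons r l1 ih => simp [ih, Nat.succ_mul, Nat.add_comm]

theorem pvCells_card (m n : Int) (l : List (Int × Int)) (hnd : l.Nodup)
    (h : ∀ p ∈ l, pvInb m n p) : l.length ≤ m.toNat * n.toNat := by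
  have hsub : l.toFinset ⊆ Finset.Ico 0 m ×ˢ Finset.Ico 0 n := by
    intro p hp
    have := h p (List.mem_toFinset.1 hp)
    simp only [Finset.mem_product, Finset.mem_Ico]
    exact ⟨⟨this.1, this.2.1⟩, this.2.2.1, this.2.2.2⟩
  have := Finset.card_le_card hsub
  rw [List.toFinset_card_of_nodup hnd] at this
  simpa [Finset.card_product, Int.card_Ico] using this

theorem pvStates_card (m n : Int) (l : List (Int × Int × Int)) (hnd : l.Nodup)
    (h : ∀ s ∈ l, pvValid m n s) : l.length ≤ 2 * (m.toNat * n.toNat) := by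
  have hsub : l.toFinset ⊆ Finset.Ico 0 m ×ˢ Finset.Ico 0 n ×ˢ ({0, 1} : Finset Int) := by
    intro s hs
    have := h s (List.mem_toFinset.1 hs)
    simp only [Finset.mem_product, Finset.mem_Ico, Finset.mem_insert, Finset.mem_singleton]
    exact ⟨⟨this.1.1, this.1.2.1⟩, ⟨this.1.2.2.1, this.1.2.2.2⟩, this.2⟩
  have := Finset.card_le_card hsub
  rw [List.toFinset_card_of_nodup hnd] at this
  have h2 : ({0, 1} : Finset Int).card = 2 := by decide
  simp only [Finset.card_product, Int.card_Ico, h2, sub_zero] at this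
  have he : m.toNat * (n.toNat * 2) = 2 * (m.toNat * n.toNat) := by ring
  omega

theorem pvRF_mem (grid : List (List Int)) (m n : Int) (P : Int × Int → Prop)
    (seen : List (Int × Int))
    (hbase : ∀ p, P p → p ∈ seen)
    (hclosed : ∀ p ∈ seen, ∀ d ∈ pvDirs, pvOpenP grid m n (p.1 + d.1, p.2 + d.2) →
      (p.1 + d.1, p.2 + d.2) ∈ seen) :
    ∀ p, pvRF grid m n P p → p ∈ seen := by
  intro p h
  induction h with
  | base p hp => exact hbase p hp
  | step p d _ hd hop ih => exact hclosed p ih d hd hop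

theorem pvFloodInner (grid : List (List Int)) (m n : Int) (q : Int × Int)
    (ds : List (Int × Int)) (acc : PySem.Set (Int × Int) × List (Int × Int)) :
    ∃ new : List (Int × Int),
      ds.foldl (fun acc d =>
          let nb := (q.1 + d.1, q.2 + d.2)
          if pvOpen grid m n nb.1 nb.2 && !(PySem.Set.contains acc.1 nb) then
            (PySem.Set.add acc.1 nb, acc.2 ++ [nb])
          else acc) acc = (acc.1 ++ new, acc.2 ++ new) ∧
      (∀ x ∈ new, pvOpenP grid m n x ∧ ∃ d ∈ ds, x = (q.1 + d.1, q.2 + d.2)) ∧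
      (∀ d ∈ ds, pvOpenP grid m n (q.1 + d.1, q.2 + d.2) → (q.1 + d.1, q.2 + d.2) ∈ acc.1 ++ new) ∧
      (acc.1.Nodup → (acc.1 ++ new).Nodup) := by
  induction ds generalizing acc with
  | nil => exact ⟨[], by simp⟩
  | cons d ds ih =>
      simp only [List.foldl_cons]
      by_cases hc : (pvOpen grid m n (q.1 + d.1, q.2 + d.2).1 (q.1 + d.1, q.2 + d.2).2 &&
          !(PySem.Set.contains acc.1 (q.1 + d.1, q.2 + d.2))) = true
      · have hparts : pvOpen grid m n (q.1 + d.1, q.2 + d.2).1 (q.1 + d.1, q.2 + d.2).2 = true ∧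
            (!PySem.Set.contains acc.1 (q.1 + d.1, q.2 + d.2)) = true := by
          rw [← Bool.and_eq_true]; exact hc
        have hmem : (q.1 + d.1, q.2 + d.2) ∉ acc.1 := by
          intro hx
          have h2 := hparts.2
          rw [(PySem.Set.contains_iff acc.1 _).2 hx] at h2
          simp at h2
        have hop : pvOpenP grid m n (q.1 + d.1, q.2 + d.2) :=
          (pvOpen_iff grid m n _ _).1 hparts.1
        rw [if_pos hc, PySem.Set.add_of_not_mem hmem]
        obtain ⟨new, heq, hprops, hcompl, hnd⟩ := ih (acc.1 ++ [(q.1 + d.1, q.2 + d.2)], acc.2 ++ [(q.1 + d.1, q.2 + d.2)])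
        refine ⟨(q.1 + d.1, q.2 + d.2) :: new, by simpa using heq, ?_, ?_, ?_⟩
        · intro x hx
          rcases List.mem_cons.1 hx with rfl | hx'
          · exact ⟨hop, d, List.mem_cons_self .., rfl⟩
          · obtain ⟨ho, d', hd', hx''⟩ := hprops x hx'
            exact ⟨ho, d', List.mem_cons_of_mem _ hd', hx''⟩
        · intro d' hd' ho
          rcases List.mem_cons.1 hd' with rfl | hd''
          · simp
          · simpa using hcompl d' hd'' ho
        · intro hnd0
          have h1 : (acc.1 ++ [(q.1 + d.1, q.2 + d.2)]).Nodup := pvNodup_concat _ _ hnd0 hmem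
          simpa using hnd h1
      · rw [if_neg hc]
        obtain ⟨new, heq, hprops, hcompl, hnd⟩ := ih acc
        refine ⟨new, heq, ?_, ?_, hnd⟩
        · intro x hx
          obtain ⟨ho, d', hd', hx'⟩ := hprops x hx
          exact ⟨ho, d', List.mem_cons_of_mem _ hd', hx'⟩
        · intro d' hd' ho
          rcases List.mem_cons.1 hd' with rfl | hd''
          · have hopb : pvOpen grid m n (q.1 + d'.1) (q.2 + d'.2) = true :=
              (pvOpen_iff grid m n _ _).2 ho
            have hcon : PySem.Set.contains acc.1 (q.1 + d'.1, q.2 + d'.2) = true := by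
              by_contra hx
              exact hc (by simp_all)
            exact List.mem_append_left _ ((PySem.Set.contains_iff _ _).1 hcon)
          · exact hcompl d' hd'' ho

theorem pvFloodOuter (grid : List (List Int)) (m n : Int)
    (fr : List (Int × Int)) (acc : PySem.Set (Int × Int) × List (Int × Int)) :
    ∃ new : List (Int × Int),
      fr.foldl (fun acc q =>
          pvDirs.foldl (fun acc d =>
            let nb := (q.1 + d.1, q.2 + d.2)
            if pvOpen grid m n nb.1 nb.2 && !(PySem.Set.contains acc.1 nb) then
              (PySem.Set.add acc.1 nb, acc.2 ++ [nb])
            else acc) acc) acc = (acc.1 ++ new, acc.2 ++ new) ∧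
      (∀ x ∈ new, pvOpenP grid m n x ∧ ∃ p ∈ fr, ∃ d ∈ pvDirs, x = (p.1 + d.1, p.2 + d.2)) ∧
      (∀ p ∈ fr, ∀ d ∈ pvDirs, pvOpenP grid m n (p.1 + d.1, p.2 + d.2) →
        (p.1 + d.1, p.2 + d.2) ∈ acc.1 ++ new) ∧
      (acc.1.Nodup → (acc.1 ++ new).Nodup) := by
  induction fr generalizing acc with
  | nil => exact ⟨[], by simp⟩
  | cons p fr ih =>
      simp only [List.foldl_cons]
      obtain ⟨n1, heq1, hprops1, hcompl1, hnd1⟩ := pvFloodInner grid m n p pvDirs acc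
      rw [heq1]
      obtain ⟨n2, heq2, hprops2, hcompl2, hnd2⟩ := ih (acc.1 ++ n1, acc.2 ++ n1)
      refine ⟨n1 ++ n2, by simpa [List.append_assoc] using heq2, ?_, ?_, ?_⟩
      · intro x hx
        rcases List.mem_append.1 hx with hx1 | hx2
        · obtain ⟨ho, d, hd, he⟩ := hprops1 x hx1
          exact ⟨ho, p, List.mem_cons_self .., d, hd, he⟩
        · obtain ⟨ho, p', hp', d, hd, he⟩ := hprops2 x hx2
          exact ⟨ho, p', List.mem_cons_of_mem _ hp', d, hd, he⟩
      · intro p' hp' d hd ho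
        rcases List.mem_cons.1 hp' with rfl | hp''
        · have := hcompl1 d hd ho
          rw [← List.append_assoc]
          exact List.mem_append_left _ this
        · have := hcompl2 p' hp'' d hd ho
          simpa [List.append_assoc] using this
      · intro hnd0
        have := hnd2 (hnd1 hnd0)
        simpa [List.append_assoc] using this
theorem pvFlood_correct (grid : List (List Int)) (m n : Int) (P : Int × Int → Prop) :
    ∀ (fuel : Nat) (fr seen : List (Int × Int)),
    seen.Nodup →
    (∀ p ∈ fr, p ∈ seen) →
    (∀ p ∈ seen, pvInb m n p) →
    (∀ p, P p → p ∈ seen) →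
    (∀ p ∈ seen, pvRF grid m n P p) →
    (∀ p ∈ seen, p ∉ fr → ∀ d ∈ pvDirs, pvOpenP grid m n (p.1 + d.1, p.2 + d.2) →
      (p.1 + d.1, p.2 + d.2) ∈ seen) →
    (m.toNat * n.toNat + 2 ≤ fuel + seen.length) →
    (pvFlood grid m n fuel fr seen).Nodup ∧
      (∀ p, p ∈ pvFlood grid m n fuel fr seen ↔ pvRF grid m n P p) := by
  intro fuel
  induction fuel with
  | zero =>
      intro fr seen hnd _ hinb _ _ _ hfuel
      have := pvCells_card m n seen hnd hinb
      omega
  | succ fuel ih =>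
      intro fr seen hnd hfr hinb hbase hseenRF hsc hfuel
      match fr with
      | [] =>
          simp only [pvFlood]
          refine ⟨hnd, fun p => ⟨hseenRF p, ?_⟩⟩
          intro h
          exact pvRF_mem grid m n P seen hbase
            (fun p hp d hd ho => hsc p hp (List.not_mem_nil) d hd ho) p h
      | p :: fr' =>
          obtain ⟨new, heq, hprops, hcompl, hndp⟩ :=
            pvFloodOuter grid m n (p :: fr') (seen, ([] : List (Int × Int)))
          simp only [pvFlood, heq]
          have hclosed' : ∀ x ∈ seen ++ new, x ∉ new → ∀ d ∈ pvDirs,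
              pvOpenP grid m n (x.1 + d.1, x.2 + d.2) → (x.1 + d.1, x.2 + d.2) ∈ seen ++ new := by
            intro x hx hxn d hd ho
            rcases List.mem_append.1 hx with hxs | hxn2
            · by_cases hxf : x ∈ p :: fr'
              · exact hcompl x hxf d hd ho
              · exact List.mem_append_left _ (hsc x hxs hxf d hd ho)
            · exact absurd hxn2 hxn
          have hRF' : ∀ x ∈ seen ++ new, pvRF grid m n P x := by
            intro x hx
            rcases List.mem_append.1 hx with hxs | hxn2
            · exact hseenRF x hxs
            · obtain ⟨ho, p', hp', d, hd, he⟩ := hprops x hxn2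
              have := hseenRF p' (hfr p' hp')
              exact he ▸ pvRF.step p' d this hd (he ▸ ho)
          have hinb' : ∀ x ∈ seen ++ new, pvInb m n x := by
            intro x hx
            rcases List.mem_append.1 hx with hxs | hxn2
            · exact hinb x hxs
            · exact (hprops x hxn2).1.1
          match hne : new with
          | [] =>
              have hres : ∀ x ∈ seen, ∀ d ∈ pvDirs, pvOpenP grid m n (x.1 + d.1, x.2 + d.2) →
                  (x.1 + d.1, x.2 + d.2) ∈ seen := by
                intro x hx d hd ho
                have := hclosed' x (by simpa using hx) (List.not_mem_nil) d hd ho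
                simpa using this
              have hval : pvFlood grid m n fuel [] (seen ++ []) = seen := by
                cases fuel <;> simp [pvFlood]
              simp only [List.nil_append]
              rw [hval]
              exact ⟨hnd, fun x => ⟨hseenRF x, pvRF_mem grid m n P seen hbase hres x⟩⟩
          | y :: new' =>
              apply ih
              · exact hndp hnd
              · exact fun x hx => List.mem_append_right _ hx
              · exact hinb'
              · exact fun x hx => List.mem_append_left _ (hbase x hx)
              · exact hRF'
              · exact hclosed'
              · simp only [List.length_append, List.length_cons]
                omega

theorem pvStepA_char (grid : List (List Int)) (m n : Int) (s₀ : Int × Int × Int)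
    (d : Int × Int)
    (acc : PySem.Set (Int × Int × Int) × PySem.Set (Int × Int) × List (Int × Int × Int)) :
    ∃ new : List (Int × Int × Int),
      (pvStepA grid m n s₀.1 s₀.2.1 s₀.2.2 acc d).1 = acc.1 ++ new ∧
      (pvStepA grid m n s₀.1 s₀.2.1 s₀.2.2 acc d).2.2 = acc.2.2 ++ new ∧
      (∀ t ∈ new, pvEdgeAd grid m n d s₀ t) ∧
      (acc.1.Nodup → (acc.1 ++ new).Nodup) ∧
      ((∀ p, p ∈ acc.2.1 ↔ ∃ b, (p.1, p.2, b) ∈ acc.1) →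
        (∀ p, p ∈ (pvStepA grid m n s₀.1 s₀.2.1 s₀.2.2 acc d).2.1 ↔ ∃ b, (p.1, p.2, b) ∈ acc.1 ++ new)) ∧
      (acc.2.1.Nodup → (pvStepA grid m n s₀.1 s₀.2.1 s₀.2.2 acc d).2.1.Nodup) ∧
      (∀ t, pvEdgeAd grid m n d s₀ t → t ∈ acc.1 ++ new) := by
  simp only [pvStepA]
  by_cases h1 : 0 ≤ s₀.1 + d.1 ∧ s₀.1 + d.1 < m ∧ 0 ≤ s₀.2.1 + d.2 ∧ s₀.2.1 + d.2 < n
  · rw [if_pos h1]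
    by_cases h2 : pvCell grid (s₀.1 + d.1) (s₀.2.1 + d.2) = 1
    · rw [if_pos h2]
      by_cases h3 : s₀.2.2 = 0
      · rw [if_pos h3]
        by_cases h4 : (0 ≤ s₀.1 - d.1 ∧ s₀.1 - d.1 < m ∧ 0 ≤ s₀.2.1 - d.2 ∧ s₀.2.1 - d.2 < n) ∧
            pvCell grid (s₀.1 - d.1) (s₀.2.1 - d.2) ≠ 1
        · rw [if_pos h4]
          by_cases h5 : (s₀.1 - d.1, s₀.2.1 - d.2, (1:Int)) ∈ acc.1
          · rw [if_pos h5]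
            refine ⟨[], by simp, by simp, by simp, by simp, ?_, by simp, ?_⟩
            · intro hH; simpa using hH
            · rintro t (⟨hop, rfl⟩ | ⟨hb0, hinb, hcell, hop, rfl⟩)
              · exact absurd h2 hop.2
              · simpa using h5
          · rw [if_neg h5]
            refine ⟨[(s₀.1 - d.1, s₀.2.1 - d.2, 1)],
              by simp [PySem.Set.add_of_not_mem h5], by simp, ?_, ?_, ?_, ?_, ?_⟩
            · intro t ht
              rcases List.mem_singleton.1 ht with rfl
              exact Or.inr ⟨h3, h1, h2, h4, rfl⟩
            · intro hnd
              exact pvNodup_concat _ _ hnd h5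
            · intro hH p
              simp only [PySem.Set.mem_add, hH p,
                List.mem_append, List.mem_singleton, Prod.ext_iff]
              constructor
              · rintro (⟨b, hb⟩ | ⟨hp1, hp2⟩)
                · exact ⟨b, Or.inl hb⟩
                · exact ⟨1, Or.inr ⟨hp1, hp2, rfl⟩⟩
              · rintro ⟨b, hb | ⟨hb1, hb2, hb3⟩⟩
                · exact Or.inl ⟨b, hb⟩
                · exact Or.inr ⟨hb1, hb2⟩
            · intro hnd
              exact PySem.Set.nodup_add _ _ hnd
            · rintro t (⟨hop, rfl⟩ | ⟨hb0, hinb, hcell, hop, rfl⟩)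
              · exact absurd h2 hop.2
              · simp
        · rw [if_neg h4]
          refine ⟨[], by simp, by simp, by simp, by simp, ?_, by simp, ?_⟩
          · intro hH; simpa using hH
          · rintro t (⟨hop, rfl⟩ | ⟨hb0, hinb, hcell, hop, rfl⟩)
            · exact absurd h2 hop.2
            · exact absurd ⟨⟨hop.1.1, hop.1.2.1, hop.1.2.2.1, hop.1.2.2.2⟩, hop.2⟩ h4
      · rw [if_neg h3]
        refine ⟨[], by simp, by simp, by simp, by simp, ?_, by simp, ?_⟩
        · intro hH; simpa using hH
        · rintro t (⟨hop, rfl⟩ | ⟨hb0, hinb, hcell, hop, rfl⟩)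
          · exact absurd h2 hop.2
          · exact absurd hb0 h3
    · rw [if_neg h2]
      by_cases h6 : (s₀.1 + d.1, s₀.2.1 + d.2, s₀.2.2) ∈ acc.1
      · rw [if_pos h6]
        refine ⟨[], by simp, by simp, by simp, by simp, ?_, by simp, ?_⟩
        · intro hH; simpa using hH
        · rintro t (⟨hop, rfl⟩ | ⟨hb0, hinb, hcell, hop, rfl⟩)
          · simpa using h6
          · exact absurd hcell h2
      · rw [if_neg h6]
        refine ⟨[(s₀.1 + d.1, s₀.2.1 + d.2, s₀.2.2)],
          by simp [PySem.Set.add_of_not_mem h6], by simp, ?_, ?_, ?_, ?_, ?_⟩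
        · intro t ht
          rcases List.mem_singleton.1 ht with rfl
          exact Or.inl ⟨⟨⟨h1.1, h1.2.1, h1.2.2.1, h1.2.2.2⟩, h2⟩, rfl⟩
        · intro hnd
          exact pvNodup_concat _ _ hnd h6
        · intro hH p
          simp only [PySem.Set.mem_add, hH p,
            List.mem_append, List.mem_singleton, Prod.ext_iff]
          constructor
          · rintro (⟨b, hb⟩ | ⟨hp1, hp2⟩)
            · exact ⟨b, Or.inl hb⟩
            · exact ⟨s₀.2.2, Or.inr ⟨hp1, hp2, rfl⟩⟩
          · rintro ⟨b, hb | ⟨hb1, hb2, hb3⟩⟩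
            · exact Or.inl ⟨b, hb⟩
            · exact Or.inr ⟨hb1, hb2⟩
        · intro hnd
          exact PySem.Set.nodup_add _ _ hnd
        · rintro t (⟨hop, rfl⟩ | ⟨hb0, hinb, hcell, hop, rfl⟩)
          · simp
          · exact absurd hcell h2
  · rw [if_neg h1]
    refine ⟨[], by simp, by simp, by simp, by simp, ?_, by simp, ?_⟩
    · intro hH; simpa using hH
    · rintro t (⟨hop, rfl⟩ | ⟨hb0, hinb, hcell, hop, rfl⟩)
      · exact absurd ⟨hop.1.1, hop.1.2.1, hop.1.2.2.1, hop.1.2.2.2⟩ h1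
      · exact absurd ⟨hinb.1, hinb.2.1, hinb.2.2.1, hinb.2.2.2⟩ h1

theorem pvExpandA_char (grid : List (List Int)) (m n : Int) (s₀ : Int × Int × Int)
    (ds : List (Int × Int))
    (acc : PySem.Set (Int × Int × Int) × PySem.Set (Int × Int) × List (Int × Int × Int)) :
    ∃ new : List (Int × Int × Int),
      (ds.foldl (pvStepA grid m n s₀.1 s₀.2.1 s₀.2.2) acc).1 = acc.1 ++ new ∧
      (ds.foldl (pvStepA grid m n s₀.1 s₀.2.1 s₀.2.2) acc).2.2 = acc.2.2 ++ new ∧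
      (∀ t ∈ new, ∃ d ∈ ds, pvEdgeAd grid m n d s₀ t) ∧
      (acc.1.Nodup → (acc.1 ++ new).Nodup) ∧
      ((∀ p, p ∈ acc.2.1 ↔ ∃ b, (p.1, p.2, b) ∈ acc.1) →
        (∀ p, p ∈ (ds.foldl (pvStepA grid m n s₀.1 s₀.2.1 s₀.2.2) acc).2.1 ↔
          ∃ b, (p.1, p.2, b) ∈ acc.1 ++ new)) ∧
      (acc.2.1.Nodup → (ds.foldl (pvStepA grid m n s₀.1 s₀.2.1 s₀.2.2) acc).2.1.Nodup) ∧
      (∀ d ∈ ds, ∀ t, pvEdgeAd grid m n d s₀ t → t ∈ acc.1 ++ new) := by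
  induction ds generalizing acc with
  | nil => exact ⟨[], by simp, by simp, by simp, by simp, by simp, by simp, by simp⟩
  | cons d ds ih =>
      simp only [List.foldl_cons]
      obtain ⟨n1, hv1, hq1, he1, hnd1, hH1, hhnd1, hc1⟩ := pvStepA_char grid m n s₀ d acc
      obtain ⟨n2, hv2, hq2, he2, hnd2, hH2, hhnd2, hc2⟩ :=
        ih (pvStepA grid m n s₀.1 s₀.2.1 s₀.2.2 acc d)
      refine ⟨n1 ++ n2, ?_, ?_, ?_, ?_, ?_, ?_, ?_⟩
      · rw [hv2, hv1, List.append_assoc]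
      · rw [hq2, hq1, List.append_assoc]
      · intro t ht
        rcases List.mem_append.1 ht with ht1 | ht2
        · exact ⟨d, List.mem_cons_self .., he1 t ht1⟩
        · obtain ⟨d', hd', he⟩ := he2 t ht2
          exact ⟨d', List.mem_cons_of_mem _ hd', he⟩
      · intro hnd
        rw [← List.append_assoc, ← hv1]
        exact hnd2 (hv1 ▸ hnd1 hnd)
      · intro hH p
        have := hH2 (by rw [hv1]; exact hH1 hH) p
        rw [this, hv1, List.append_assoc]
      · intro hnd
        exact hhnd2 (hhnd1 hnd)
      · intro d' hd' t het
        rcases List.mem_cons.1 hd' with rfl | hd''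
        · have h := hc1 t het
          rw [← List.append_assoc]
          exact List.mem_append_left _ h
        · have h := hc2 d' hd'' t het
          rw [hv1] at h
          rw [← List.append_assoc]
          exact h

theorem pvEdgeAd_valid (grid : List (List Int)) (m n : Int) (d : Int × Int)
    (s t : Int × Int × Int) (hs : pvValid m n s) (h : pvEdgeAd grid m n d s t) :
    pvValid m n t := by
  rcases h with ⟨hop, rfl⟩ | ⟨_, _, _, hop, rfl⟩
  · exact ⟨hop.1, hs.2⟩
  · exact ⟨hop.1, Or.inr rfl⟩

theorem pvRA_mem (grid : List (List Int)) (m n : Int) (vis : List (Int × Int × Int))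
    (hsrc : ∀ p : Int × Int, (pvInb m n p ∧ pvCell grid p.1 p.2 = 2) → (p.1, p.2, 0) ∈ vis)
    (hclosed : ∀ s ∈ vis, ∀ t, pvEdgeA grid m n s t → t ∈ vis) :
    ∀ s, pvRA grid m n s → s ∈ vis := by
  intro s h
  induction h with
  | src p hp => exact hsrc p hp
  | step s t _ he ih => exact hclosed s ih t he

theorem pvLoopA_correct (grid : List (List Int)) (m n : Int) :
    ∀ (fuel : Nat) (q : List (Int × Int × Int)) (vis : PySem.Set (Int × Int × Int))
      (heard : PySem.Set (Int × Int)),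
    vis.Nodup → heard.Nodup →
    (∀ s ∈ q, s ∈ vis) →
    (∀ s ∈ vis, pvValid m n s) →
    (∀ s ∈ vis, s ∉ q → ∀ t, pvEdgeA grid m n s t → t ∈ vis) →
    (∀ s ∈ vis, pvRA grid m n s) →
    (∀ p, p ∈ heard ↔ ∃ b, (p.1, p.2, b) ∈ vis) →
    (∀ p : Int × Int, (pvInb m n p ∧ pvCell grid p.1 p.2 = 2) → (p.1, p.2, 0) ∈ vis) →
    (q.length + (2 * (m.toNat * n.toNat) - vis.length) ≤ fuel) →
    ((∀ s, s ∈ (pvLoopA grid m n fuel q vis heard).1 ↔ pvRA grid m n s) ∧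
      (∀ p, p ∈ (pvLoopA grid m n fuel q vis heard).2 ↔
        ∃ b, (p.1, p.2, b) ∈ (pvLoopA grid m n fuel q vis heard).1) ∧
      (pvLoopA grid m n fuel q vis heard).2.Nodup) := by
  intro fuel
  induction fuel with
  | zero =>
      intro q vis heard hnd hhnd hq hval hsc hRA hH hsrc hfuel
      have hq0 : q = [] := List.length_eq_zero_iff.1 (by omega)
      subst hq0
      simp only [pvLoopA]
      refine ⟨fun s => ⟨hRA s, ?_⟩, hH, hhnd⟩
      exact fun h => pvRA_mem grid m n vis hsrc
        (fun s hs t het => hsc s hs (List.not_mem_nil) t het) s h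
  | succ fuel ih =>
      intro q vis heard hnd hhnd hq hval hsc hRA hH hsrc hfuel
      match q with
      | [] =>
          simp only [pvLoopA]
          refine ⟨fun s => ⟨hRA s, ?_⟩, hH, hhnd⟩
          exact fun h => pvRA_mem grid m n vis hsrc
            (fun s hs t het => hsc s hs (List.not_mem_nil) t het) s h
      | s :: q' =>
          obtain ⟨new, hv, hqq, he, hnd1, hH1, hhnd1, hc⟩ :=
            pvExpandA_char grid m n s pvDirs (vis, heard, q')
          simp only [pvLoopA, hv, hqq]
          have hsvalid : pvValid m n s := hval s (hq s (List.mem_cons_self ..))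
          have hsRA : pvRA grid m n s := hRA s (hq s (List.mem_cons_self ..))
          have hvis'nd : (vis ++ new).Nodup := hnd1 hnd
          have hval' : ∀ x ∈ vis ++ new, pvValid m n x := by
            intro x hx
            rcases List.mem_append.1 hx with hx1 | hx2
            · exact hval x hx1
            · obtain ⟨d, _, hed⟩ := he x hx2
              exact pvEdgeAd_valid grid m n d s x hsvalid hed
          apply ih
          · exact hvis'nd
          · exact hhnd1 hhnd
          · intro x hx
            rcases List.mem_append.1 hx with hx1 | hx2
            · exact List.mem_append_left _ (hq x (List.mem_cons_of_mem _ hx1))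
            · exact List.mem_append_right _ hx2
          · exact hval'
          · intro x hx hxq t het
            rcases List.mem_append.1 hx with hx1 | hx2
            · by_cases hxs : x = s
              · subst hxs
                obtain ⟨d, hd, hed⟩ := het
                exact hc d hd t hed
              · have hxq' : x ∉ s :: q' := by
                  intro hx3
                  rcases List.mem_cons.1 hx3 with h | h
                  · exact hxs h
                  · exact hxq (List.mem_append_left _ h)
                exact List.mem_append_left _ (hsc x hx1 hxq' t het)
            · exact absurd (List.mem_append_right _ hx2) hxq
          · intro x hx
            rcases List.mem_append.1 hx with hx1 | hx2
            · exact hRA x hx1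
            · obtain ⟨d, hd, hed⟩ := he x hx2
              exact pvRA.step s x hsRA ⟨d, hd, hed⟩
          · exact hH1 hH
          · exact fun p hp => List.mem_append_left _ (hsrc p hp)
          · have hlen : (vis ++ new).length ≤ 2 * (m.toNat * n.toNat) :=
              pvStates_card m n (vis ++ new) hvis'nd hval'
            simp only [List.length_append, List.length_cons] at hfuel hlen ⊢
            omega

-- flatten A's initialisation double loop into one fold over the cell list
theorem pvInitDouble (grid : List (List Int)) (l1 l2 : List Int)
    (a0 : List (Int × Int × Int) × PySem.Set (Int × Int × Int) × PySem.Set (Int × Int)) :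
    l1.foldl (fun acc r => l2.foldl (fun acc c =>
        if pvCell grid r c = 2 then
          (acc.1 ++ [(r, c, (0:Int))], PySem.Set.add acc.2.1 (r, c, (0:Int)),
           PySem.Set.add acc.2.2 (r, c))
        else acc) acc) a0 =
      (l1.flatMap (fun r => l2.map (fun c => (r, c)))).foldl (fun acc rc =>
        if pvCell grid rc.1 rc.2 = 2 then
          (acc.1 ++ [(rc.1, rc.2, (0:Int))], PySem.Set.add acc.2.1 (rc.1, rc.2, (0:Int)),
           PySem.Set.add acc.2.2 (rc.1, rc.2))
        else acc) a0 := by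
  induction l1 generalizing a0 with
  | nil => rfl
  | cons r l1 ih =>
      simp only [List.flatMap_cons, List.foldl_append, List.foldl_cons, List.foldl_map, ih]

theorem pvInit_char (grid : List (List Int)) (l : List (Int × Int))
    (a : List (Int × Int × Int) × PySem.Set (Int × Int × Int) × PySem.Set (Int × Int)) :
    (∀ s, s ∈ (l.foldl (fun acc rc =>
        if pvCell grid rc.1 rc.2 = 2 then
          (acc.1 ++ [(rc.1, rc.2, (0:Int))], PySem.Set.add acc.2.1 (rc.1, rc.2, (0:Int)),
           PySem.Set.add acc.2.2 (rc.1, rc.2))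
        else acc) a).2.1 ↔
      s ∈ a.2.1 ∨ ∃ rc ∈ l, pvCell grid rc.1 rc.2 = 2 ∧ s = (rc.1, rc.2, 0)) ∧
    (∀ s, s ∈ (l.foldl (fun acc rc =>
        if pvCell grid rc.1 rc.2 = 2 then
          (acc.1 ++ [(rc.1, rc.2, (0:Int))], PySem.Set.add acc.2.1 (rc.1, rc.2, (0:Int)),
           PySem.Set.add acc.2.2 (rc.1, rc.2))
        else acc) a).1 ↔
      s ∈ a.1 ∨ ∃ rc ∈ l, pvCell grid rc.1 rc.2 = 2 ∧ s = (rc.1, rc.2, 0)) ∧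
    ((l.foldl (fun acc rc =>
        if pvCell grid rc.1 rc.2 = 2 then
          (acc.1 ++ [(rc.1, rc.2, (0:Int))], PySem.Set.add acc.2.1 (rc.1, rc.2, (0:Int)),
           PySem.Set.add acc.2.2 (rc.1, rc.2))
        else acc) a).1.length ≤ a.1.length + l.length) ∧
    (a.2.1.Nodup → (l.foldl (fun acc rc =>
        if pvCell grid rc.1 rc.2 = 2 then
          (acc.1 ++ [(rc.1, rc.2, (0:Int))], PySem.Set.add acc.2.1 (rc.1, rc.2, (0:Int)),
           PySem.Set.add acc.2.2 (rc.1, rc.2))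
        else acc) a).2.1.Nodup) ∧
    (a.2.2.Nodup → (l.foldl (fun acc rc =>
        if pvCell grid rc.1 rc.2 = 2 then
          (acc.1 ++ [(rc.1, rc.2, (0:Int))], PySem.Set.add acc.2.1 (rc.1, rc.2, (0:Int)),
           PySem.Set.add acc.2.2 (rc.1, rc.2))
        else acc) a).2.2.Nodup) ∧
    ((∀ p, p ∈ a.2.2 ↔ ∃ b, (p.1, p.2, b) ∈ a.2.1) →
      (∀ p, p ∈ (l.foldl (fun acc rc =>
        if pvCell grid rc.1 rc.2 = 2 then
          (acc.1 ++ [(rc.1, rc.2, (0:Int))], PySem.Set.add acc.2.1 (rc.1, rc.2, (0:Int)),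
           PySem.Set.add acc.2.2 (rc.1, rc.2))
        else acc) a).2.2 ↔ ∃ b, (p.1, p.2, b) ∈ (l.foldl (fun acc rc =>
        if pvCell grid rc.1 rc.2 = 2 then
          (acc.1 ++ [(rc.1, rc.2, (0:Int))], PySem.Set.add acc.2.1 (rc.1, rc.2, (0:Int)),
           PySem.Set.add acc.2.2 (rc.1, rc.2))
        else acc) a).2.1)) := by
  induction l generalizing a with
  | nil => simp
  | cons rc l ih =>
      simp only [List.foldl_cons]
      by_cases hc : pvCell grid rc.1 rc.2 = 2
      · rw [if_pos hc]
        obtain ⟨m1, m2, m3, m4, m5, m6⟩ :=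
          ih (a.1 ++ [(rc.1, rc.2, (0:Int))], PySem.Set.add a.2.1 (rc.1, rc.2, (0:Int)),
              PySem.Set.add a.2.2 (rc.1, rc.2))
        refine ⟨?_, ?_, ?_, ?_, ?_, ?_⟩
        · intro s
          rw [m1 s]
          simp only [PySem.Set.mem_add, List.mem_cons]
          constructor
          · rintro ((hs | rfl) | ⟨rc', hrc', hcell, rfl⟩)
            · exact Or.inl hs
            · exact Or.inr ⟨rc, Or.inl rfl, hc, rfl⟩
            · exact Or.inr ⟨rc', Or.inr hrc', hcell, rfl⟩
          · rintro (hs | ⟨rc', (rfl | hrc''), hcell, rfl⟩)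
            · exact Or.inl (Or.inl hs)
            · exact Or.inl (Or.inr rfl)
            · exact Or.inr ⟨rc', hrc'', hcell, rfl⟩
        · intro s
          rw [m2 s]
          simp only [List.mem_append, List.mem_cons, List.not_mem_nil, or_false]
          constructor
          · rintro ((hs | rfl) | ⟨rc', hrc', hcell, rfl⟩)
            · exact Or.inl hs
            · exact Or.inr ⟨rc, Or.inl rfl, hc, rfl⟩
            · exact Or.inr ⟨rc', Or.inr hrc', hcell, rfl⟩
          · rintro (hs | ⟨rc', (rfl | hrc''), hcell, rfl⟩)
            · exact Or.inl (Or.inl hs)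
            · exact Or.inl (Or.inr rfl)
            · exact Or.inr ⟨rc', hrc'', hcell, rfl⟩
        · have h3 := m3
          simp at h3 ⊢
          omega
        · intro hnd
          exact m4 (PySem.Set.nodup_add _ _ hnd)
        · intro hnd
          exact m5 (PySem.Set.nodup_add _ _ hnd)
        · intro hH
          apply m6
          intro p
          simp only [PySem.Set.mem_add, hH p, Prod.ext_iff]
          constructor
          · rintro (⟨b, hb⟩ | ⟨h1', h2'⟩)
            · exact ⟨b, Or.inl hb⟩
            · exact ⟨0, Or.inr ⟨h1', h2', rfl⟩⟩
          · rintro ⟨b, hb | ⟨hb1, hb2, hb3⟩⟩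
            · exact Or.inl ⟨b, hb⟩
            · exact Or.inr ⟨hb1, hb2⟩
      · rw [if_neg hc]
        obtain ⟨m1, m2, m3, m4, m5, m6⟩ := ih a
        refine ⟨?_, ?_, ?_, ?_, m5, m6⟩
        · intro s
          rw [m1 s]
          simp only [List.mem_cons]
          constructor
          · rintro (hs | ⟨rc', hrc', hcell, rfl⟩)
            · exact Or.inl hs
            · exact Or.inr ⟨rc', Or.inr hrc', hcell, rfl⟩
          · rintro (hs | ⟨rc', (rfl | hrc''), hcell, rfl⟩)
            · exact Or.inl hs
            · exact absurd hcell hc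
            · exact Or.inr ⟨rc', hrc'', hcell, rfl⟩
        · intro s
          rw [m2 s]
          simp only [List.mem_cons]
          constructor
          · rintro (hs | ⟨rc', hrc', hcell, rfl⟩)
            · exact Or.inl hs
            · exact Or.inr ⟨rc', Or.inr hrc', hcell, rfl⟩
          · rintro (hs | ⟨rc', (rfl | hrc''), hcell, rfl⟩)
            · exact Or.inl hs
            · exact absurd hcell hc
            · exact Or.inr ⟨rc', hrc'', hcell, rfl⟩
        · have := m3
          simp only [List.length_cons] at this ⊢
          omega
        · exact m4
theorem pvSeedInner (grid : List (List Int)) (m n : Int) (p : Int × Int)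
    (ds : List (Int × Int)) (sd : PySem.Set (Int × Int)) :
    (∀ t, t ∈ ds.foldl (fun sd d =>
        if decide (0 ≤ p.1 + d.1 ∧ p.1 + d.1 < m ∧ 0 ≤ p.2 + d.2 ∧ p.2 + d.2 < n) &&
            (pvCell grid (p.1 + d.1) (p.2 + d.2) == 1) &&
            pvOpen grid m n (p.1 - d.1) (p.2 - d.2) then
          PySem.Set.add sd (p.1 - d.1, p.2 - d.2)
        else sd) sd ↔
      t ∈ sd ∨ ∃ d ∈ ds, pvInb m n (p.1 + d.1, p.2 + d.2) ∧
        pvCell grid (p.1 + d.1) (p.2 + d.2) = 1 ∧ pvOpenP grid m n (p.1 - d.1, p.2 - d.2) ∧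
        t = (p.1 - d.1, p.2 - d.2)) ∧
    (sd.Nodup → (ds.foldl (fun sd d =>
        if decide (0 ≤ p.1 + d.1 ∧ p.1 + d.1 < m ∧ 0 ≤ p.2 + d.2 ∧ p.2 + d.2 < n) &&
            (pvCell grid (p.1 + d.1) (p.2 + d.2) == 1) &&
            pvOpen grid m n (p.1 - d.1) (p.2 - d.2) then
          PySem.Set.add sd (p.1 - d.1, p.2 - d.2)
        else sd) sd).Nodup) := by
  induction ds generalizing sd with
  | nil => simp
  | cons d ds ih =>
      simp only [List.foldl_cons]
      by_cases hc : (decide (0 ≤ p.1 + d.1 ∧ p.1 + d.1 < m ∧ 0 ≤ p.2 + d.2 ∧ p.2 + d.2 < n) &&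
          (pvCell grid (p.1 + d.1) (p.2 + d.2) == 1) &&
          pvOpen grid m n (p.1 - d.1) (p.2 - d.2)) = true
      · rw [if_pos hc]
        have hc1 : pvInb m n (p.1 + d.1, p.2 + d.2) ∧ pvCell grid (p.1 + d.1) (p.2 + d.2) = 1 ∧
            pvOpenP grid m n (p.1 - d.1, p.2 - d.2) := by
          have h1 := (Bool.and_eq_true ..).symm ▸ hc
          simp only [Bool.and_eq_true, decide_eq_true_eq, beq_iff_eq] at h1
          exact ⟨⟨h1.1.1.1, h1.1.1.2.1, h1.1.1.2.2.1, h1.1.1.2.2.2⟩, h1.1.2,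
            (pvOpen_iff grid m n _ _).1 h1.2⟩
        obtain ⟨i1, i2⟩ := ih (PySem.Set.add sd (p.1 - d.1, p.2 - d.2))
        refine ⟨?_, fun hnd => i2 (PySem.Set.nodup_add _ _ hnd)⟩
        intro t
        rw [i1 t]
        simp only [PySem.Set.mem_add, List.mem_cons]
        constructor
        · rintro ((hs | rfl) | ⟨d', hd', hrest⟩)
          · exact Or.inl hs
          · exact Or.inr ⟨d, Or.inl rfl, hc1.1, hc1.2.1, hc1.2.2, rfl⟩
          · exact Or.inr ⟨d', Or.inr hd', hrest⟩
        · rintro (hs | ⟨d', (rfl | hd'), hrest⟩)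
          · exact Or.inl (Or.inl hs)
          · exact Or.inl (Or.inr hrest.2.2.2)
          · exact Or.inr ⟨d', hd', hrest⟩
      · rw [if_neg hc]
        obtain ⟨i1, i2⟩ := ih sd
        refine ⟨?_, i2⟩
        intro t
        rw [i1 t]
        simp only [List.mem_cons]
        constructor
        · rintro (hs | ⟨d', hd', hrest⟩)
          · exact Or.inl hs
          · exact Or.inr ⟨d', Or.inr hd', hrest⟩
        · rintro (hs | ⟨d', (rfl | hd'), hrest⟩)
          · exact Or.inl hs
          · exfalso
            apply hc
            have := hrest
            simp only [Bool.and_eq_true, decide_eq_true_eq, beq_iff_eq]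
            refine ⟨⟨⟨this.1.1, this.1.2.1, this.1.2.2.1, this.1.2.2.2⟩, this.2.1⟩, ?_⟩
            exact (pvOpen_iff grid m n _ _).2 this.2.2.1
          · exact Or.inr ⟨d', hd', hrest⟩

theorem pvSeedFold_char (grid : List (List Int)) (m n : Int) (l : List (Int × Int))
    (sd : PySem.Set (Int × Int)) :
    (∀ t, t ∈ l.foldl (fun sd p =>
        pvDirs.foldl (fun sd d =>
          if decide (0 ≤ p.1 + d.1 ∧ p.1 + d.1 < m ∧ 0 ≤ p.2 + d.2 ∧ p.2 + d.2 < n) &&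
              (pvCell grid (p.1 + d.1) (p.2 + d.2) == 1) &&
              pvOpen grid m n (p.1 - d.1) (p.2 - d.2) then
            PySem.Set.add sd (p.1 - d.1, p.2 - d.2)
          else sd) sd) sd ↔
      t ∈ sd ∨ ∃ p ∈ l, pvBounce grid m n p t) ∧
    (sd.Nodup → (l.foldl (fun sd p =>
        pvDirs.foldl (fun sd d =>
          if decide (0 ≤ p.1 + d.1 ∧ p.1 + d.1 < m ∧ 0 ≤ p.2 + d.2 ∧ p.2 + d.2 < n) &&
              (pvCell grid (p.1 + d.1) (p.2 + d.2) == 1) &&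
              pvOpen grid m n (p.1 - d.1) (p.2 - d.2) then
            PySem.Set.add sd (p.1 - d.1, p.2 - d.2)
          else sd) sd) sd).Nodup) := by
  induction l generalizing sd with
  | nil => simp
  | cons p l ih =>
      simp only [List.foldl_cons]
      obtain ⟨j1, j2⟩ := pvSeedInner grid m n p pvDirs sd
      obtain ⟨i1, i2⟩ := ih (pvDirs.foldl (fun sd d =>
          if decide (0 ≤ p.1 + d.1 ∧ p.1 + d.1 < m ∧ 0 ≤ p.2 + d.2 ∧ p.2 + d.2 < n) &&
              (pvCell grid (p.1 + d.1) (p.2 + d.2) == 1) &&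
              pvOpen grid m n (p.1 - d.1) (p.2 - d.2) then
            PySem.Set.add sd (p.1 - d.1, p.2 - d.2)
          else sd) sd)
      refine ⟨?_, fun hnd => i2 (j2 hnd)⟩
      intro t
      rw [i1 t, j1 t]
      simp only [List.mem_cons, pvBounce]
      constructor
      · rintro ((hs | hb) | ⟨p', hp', hb'⟩)
        · exact Or.inl hs
        · exact Or.inr ⟨p, Or.inl rfl, hb⟩
        · exact Or.inr ⟨p', Or.inr hp', hb'⟩
      · rintro (hs | ⟨p', (rfl | hp'), hb'⟩)
        · exact Or.inl (Or.inl hs)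
        · exact Or.inl (Or.inr hb')
        · exact Or.inr ⟨p', hp', hb'⟩
theorem pvRA_to_RF (grid : List (List Int)) (m n : Int) (s : Int × Int × Int)
    (h : pvRA grid m n s) :
    (s.2.2 = 0 → pvRF grid m n (pvSrcP grid m n) (s.1, s.2.1)) ∧
    (s.2.2 = 1 → pvRF grid m n (pvSeedP grid m n) (s.1, s.2.1)) := by
  induction h with
  | src p hp =>
      refine ⟨fun _ => pvRF.base p hp, fun h1 => absurd h1 (by norm_num)⟩
  | step s t hs he ih =>
      rcases he with ⟨d, hd, ⟨hop, rfl⟩ | ⟨hb0, hinb, hcell, hop, rfl⟩⟩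
      · constructor
        · intro hb
          exact pvRF.step (s.1, s.2.1) d (ih.1 hb) hd hop
        · intro hb
          exact pvRF.step (s.1, s.2.1) d (ih.2 hb) hd hop
      · refine ⟨fun h1 => absurd h1 (by norm_num), fun _ => ?_⟩
        exact pvRF.base _ ⟨(s.1, s.2.1), ih.1 hb0, d, hd, hinb, hcell, hop, rfl⟩

theorem pvRF_src_to_RA (grid : List (List Int)) (m n : Int) (p : Int × Int)
    (h : pvRF grid m n (pvSrcP grid m n) p) : pvRA grid m n (p.1, p.2, 0) := by
  induction h with
  | base p hp => exact pvRA.src p hp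
  | step p d hp hd hop ih =>
      exact pvRA.step (p.1, p.2, 0) _ ih ⟨d, hd, Or.inl ⟨hop, rfl⟩⟩

theorem pvRF_seed_to_RA (grid : List (List Int)) (m n : Int) (p : Int × Int)
    (h : pvRF grid m n (pvSeedP grid m n) p) : pvRA grid m n (p.1, p.2, 1) := by
  induction h with
  | base p hp =>
      obtain ⟨p0, hp0, d, hd, hinb, hcell, hop, rfl⟩ := hp
      exact pvRA.step (p0.1, p0.2, 0) _ (pvRF_src_to_RA grid m n p0 hp0)
        ⟨d, hd, Or.inr ⟨rfl, hinb, hcell, hop, rfl⟩⟩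
  | step p d hp hd hop ih =>
      exact pvRA.step (p.1, p.2, 1) _ ih ⟨d, hd, Or.inl ⟨hop, rfl⟩⟩

theorem pvRA_flag (grid : List (List Int)) (m n : Int) (s : Int × Int × Int)
    (h : pvRA grid m n s) : s.2.2 = 0 ∨ s.2.2 = 1 := by
  induction h with
  | src p hp => exact Or.inl rfl
  | step s t _ he ih =>
      rcases he with ⟨d, _, ⟨_, rfl⟩ | ⟨_, _, _, _, rfl⟩⟩
      · exact ih
      · exact Or.inr rfl

-- ===== VERDICT (by name: the statement is the Claim_ definition above) =====
theorem count_heard_cells_spec : Claim_equal_count_heard_cells := by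
  unfold Claim_equal_count_heard_cells
  intro grid _ _
  unfold Spec_count_heard_cells
  by_cases hg : grid = []
  · simp [count_heard_cells, count_heard_cells_alt, hg]
  · simp only [count_heard_cells, count_heard_cells_alt, if_neg hg]
    rw [pvInitDouble]
    set m : Int := (grid.length : Int) with hm
    set n : Int := ((grid.headD []).length : Int) with hn
    set AP : List (Int × Int) := (PySem.List.pyRange 0 m 1).flatMap
      (fun r => (PySem.List.pyRange 0 n 1).map (fun c => (r, c))) with hAP
    set I := AP.foldl (fun acc rc =>
        if pvCell grid rc.1 rc.2 = 2 then
          (acc.1 ++ [(rc.1, rc.2, (0:Int))], PySem.Set.add acc.2.1 (rc.1, rc.2, (0:Int)),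
           PySem.Set.add acc.2.2 (rc.1, rc.2))
        else acc)
      (([] : List (Int × Int × Int)), (PySem.Set.empty : PySem.Set (Int × Int × Int)),
       (PySem.Set.empty : PySem.Set (Int × Int))) with hI
    set SRC : List (Int × Int) := (PySem.List.pyRange 0 m 1).flatMap (fun r =>
        ((PySem.List.pyRange 0 n 1).filter (fun c => pvCell grid r c == 2)).map
          (fun c => (r, c))) with hSRC
    set S0 := pvFlood grid m n (grid.length * (grid.headD []).length + 2)
      (PySem.Set.ofList SRC) (PySem.Set.ofList SRC) with hS0
    set SEEDS := S0.foldl (fun sd p =>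
        pvDirs.foldl (fun sd d =>
          if decide (0 ≤ p.1 + d.1 ∧ p.1 + d.1 < m ∧ 0 ≤ p.2 + d.2 ∧ p.2 + d.2 < n) &&
              (pvCell grid (p.1 + d.1) (p.2 + d.2) == 1) &&
              pvOpen grid m n (p.1 - d.1) (p.2 - d.2) then
            PySem.Set.add sd (p.1 - d.1, p.2 - d.2)
          else sd) sd)
      (PySem.Set.empty : PySem.Set (Int × Int)) with hSEEDS
    set S1 := pvFlood grid m n (grid.length * (grid.headD []).length + 2) SEEDS SEEDS with hS1
    set FIN := pvLoopA grid m n (3 * (grid.length * (grid.headD []).length) + 1) I.1 I.2.1 I.2.2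
      with hFIN
    -- basic facts about the cell universe
    have hAPmem : ∀ rc : Int × Int, rc ∈ AP ↔ pvInb m n rc := by
      intro rc
      rw [hAP]
      simp only [List.mem_flatMap, List.mem_map, PySem.List.mem_pyRange_one, pvInb]
      constructor
      · rintro ⟨a, ⟨h1, h2⟩, b, ⟨h3, h4⟩, rfl⟩
        exact ⟨h1, h2, h3, h4⟩
      · intro h
        exact ⟨rc.1, ⟨h.1, h.2.1⟩, rc.2, ⟨h.2.2.1, h.2.2.2⟩, rfl⟩
    have hAPlen : AP.length = grid.length * (grid.headD []).length := by
      rw [hAP, pvFlatMap_len]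
      simp [PySem.List.length_pyRange_one, hm, hn, Int.toNat_natCast]
    have hmn : m.toNat * n.toNat = grid.length * (grid.headD []).length := by
      simp [hm, hn, Int.toNat_natCast]
    -- initialisation of A
    obtain ⟨m1, m2, m3, m4, m5, m6⟩ := pvInit_char grid AP
      (([] : List (Int × Int × Int)), (PySem.Set.empty : PySem.Set (Int × Int × Int)),
       (PySem.Set.empty : PySem.Set (Int × Int)))
    have visChar : ∀ s, s ∈ I.2.1 ↔
        ∃ rc ∈ AP, pvCell grid rc.1 rc.2 = 2 ∧ s = (rc.1, rc.2, 0) := by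
      intro s
      rw [hI, m1 s]
      simp [PySem.Set.empty]
    have qChar : ∀ s, s ∈ I.1 ↔
        ∃ rc ∈ AP, pvCell grid rc.1 rc.2 = 2 ∧ s = (rc.1, rc.2, 0) := by
      intro s
      rw [hI, m2 s]
      simp
    -- run the BFS of A
    obtain ⟨C1, C2, C3⟩ := pvLoopA_correct grid m n
      (3 * (grid.length * (grid.headD []).length) + 1) I.1 I.2.1 I.2.2
      (by rw [hI]; exact m4 (by simp [PySem.Set.empty]))
      (by rw [hI]; exact m5 (by simp [PySem.Set.empty]))
      (fun s hs => (visChar s).2 ((qChar s).1 hs))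
      (by
        intro s hs
        obtain ⟨rc, hrc, hcell, rfl⟩ := (visChar s).1 hs
        exact ⟨(hAPmem rc).1 hrc, Or.inl rfl⟩)
      (fun s hs hsq => absurd ((qChar s).2 ((visChar s).1 hs)) hsq)
      (by
        intro s hs
        obtain ⟨rc, hrc, hcell, rfl⟩ := (visChar s).1 hs
        exact pvRA.src rc ⟨(hAPmem rc).1 hrc, hcell⟩)
      (by
        intro p
        rw [hI, m6 (by simp [PySem.Set.empty]) p])
      (by
        intro p hp
        exact (visChar (p.1, p.2, 0)).2 ⟨(p.1, p.2), (hAPmem _).2 hp.1, hp.2, rfl⟩)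
      (by
        have hq0 : I.1.length ≤ grid.length * (grid.headD []).length := by
          rw [hI]
          have := m3
          simpa [hAPlen] using this
        omega)
    rw [← hFIN] at C1 C2 C3
    -- the source list of B
    have hSRCmem : ∀ p : Int × Int, p ∈ SRC ↔ pvSrcP grid m n p := by
      intro p
      rw [hSRC]
      simp only [List.mem_flatMap, List.mem_map, List.mem_filter,
        PySem.List.mem_pyRange_one, pvSrcP, pvInb, beq_iff_eq]
      constructor
      · rintro ⟨a, ⟨h1, h2⟩, b, ⟨⟨h3, h4⟩, h5⟩, rfl⟩
        exact ⟨⟨h1, h2, h3, h4⟩, h5⟩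
      · intro h
        exact ⟨p.1, ⟨h.1.1, h.1.2.1⟩, p.2, ⟨⟨h.1.2.2.1, h.1.2.2.2⟩, h.2⟩, rfl⟩
    -- first flood fill of B
    obtain ⟨hS0nd, hS0mem⟩ := (hS0 ▸ pvFlood_correct grid m n (pvSrcP grid m n)
      (grid.length * (grid.headD []).length + 2) (PySem.Set.ofList SRC) (PySem.Set.ofList SRC)
      (PySem.Set.nodup_ofList _)
      (fun p hp => hp)
      (fun p hp => ((hSRCmem p).1 ((PySem.Set.mem_ofList _ _).1 hp)).1)
      (fun p hp => (PySem.Set.mem_ofList _ _).2 ((hSRCmem p).2 hp))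
      (fun p hp => pvRF.base p ((hSRCmem p).1 ((PySem.Set.mem_ofList _ _).1 hp)))
      (fun p hp hnp => absurd hp hnp)
      (by omega))
    -- the seed set of B
    obtain ⟨j1, j2⟩ := pvSeedFold_char grid m n S0 (PySem.Set.empty : PySem.Set (Int × Int))
    rw [← hSEEDS] at j1 j2
    have hSEEDmem : ∀ t, t ∈ SEEDS ↔ pvSeedP grid m n t := by
      intro t
      rw [j1 t]
      simp only [PySem.Set.empty, List.not_mem_nil, false_or, pvSeedP]
      constructor
      · rintro ⟨p, hp, hb⟩
        exact ⟨p, (hS0mem p).1 hp, hb⟩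
      · rintro ⟨p, hp, hb⟩
        exact ⟨p, (hS0mem p).2 hp, hb⟩
    have hSEEDnd : SEEDS.Nodup := j2 (List.nodup_nil)
    -- second flood fill of B
    obtain ⟨hS1nd, hS1mem⟩ := (hS1 ▸ pvFlood_correct grid m n (pvSeedP grid m n)
      (grid.length * (grid.headD []).length + 2) SEEDS SEEDS
      hSEEDnd
      (fun p hp => hp)
      (by
        intro p hp
        obtain ⟨p0, _, d, _, _, _, hop, rfl⟩ := (hSEEDmem p).1 hp
        exact hop.1)
      (fun p hp => (hSEEDmem p).2 hp)
      (fun p hp => pvRF.base p ((hSEEDmem p).1 hp))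
      (fun p hp hnp => absurd hp hnp)
      (by omega))
    -- the two heard sets coincide
    have hmemeq : ∀ x : Int × Int, x ∈ FIN.2 ↔ x ∈ PySem.Set.union S0 S1 := by
      intro x
      rw [C2 x, PySem.Set.mem_union]
      constructor
      · rintro ⟨b, hb⟩
        have hra := (C1 _).1 hb
        rcases pvRA_flag grid m n _ hra with h0 | h1
        · simp only at h0
          subst h0
          exact Or.inl ((hS0mem x).2 ((pvRA_to_RF grid m n _ hra).1 rfl))
        · simp only at h1
          subst h1
          exact Or.inr ((hS1mem x).2 ((pvRA_to_RF grid m n _ hra).2 rfl))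
      · rintro (hx | hx)
        · exact ⟨0, (C1 _).2 (pvRF_src_to_RA grid m n x ((hS0mem x).1 hx))⟩
        · exact ⟨1, (C1 _).2 (pvRF_seed_to_RA grid m n x ((hS1mem x).1 hx))⟩
    have hlen : FIN.2.length = (PySem.Set.union S0 S1).length :=
      pvLen_eq _ _ C3 (PySem.Set.nodup_union _ _ hS0nd) hmemeq
    show PySem.Set.len FIN.2 = PySem.Set.len (PySem.Set.union S0 S1)
    simp only [PySem.Set.len, hlen]
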